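-- pv_equiv track=rewrite | github.com/beyond-immersion/bannou-service | scripts/generate-faq-catalog.py | extract_fallback_blockquote
-- ===== SOURCE A (Python) =====
-- def extract_fallback_blockquote(content: str) -> str:
--     """Extract first blockquote paragraph after title as fallback.
--
--     Used when no > **Short Answer**: field exists. Looks for the first
--     blockquote text that is not a metadata field.
--     """
--     lines = content.split('\n')
--     title_found = False
--     collecting = False
--     blockquote_lines = []
--
--     for line in lines:
--         if not title_found:
--             if line.startswith('# ') and not line.startswith('## '):
--                 title_found = True
--             continue
--
--         stripped = line.strip()
--
--         if not collecting:
--             # Skip blank lines, separators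
--             if stripped == '' or stripped == '---':
--                 continue
--             # Skip metadata fields
--             if stripped.startswith('> **'):
--                 continue
--             # Start collecting plain blockquote text
--             if stripped.startswith('> '):
--                 collecting = True
--                 blockquote_lines.append(stripped[2:])
--             elif stripped.startswith('>'):
--                 collecting = True
--                 blockquote_lines.append(stripped[1:])
--             else:
--                 break
--         else:
--             if stripped.startswith('> '):
--                 blockquote_lines.append(stripped[2:])
--             elif stripped.startswith('>'):
--                 blockquote_lines.append(stripped[1:])
--             else:
--                 break
--
--     return '\n'.join(blockquote_lines)
-- ===== SOURCE B (Python) =====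
-- def extract_fallback_blockquote(content: str) -> str:
--     """Boolean-mask re-implementation: classify lines up front, locate the
--     blockquote block boundaries with .index, then slice and join."""
--     lines = content.split('\n')
--     titles = [i for i, l in enumerate(lines)
--               if l.startswith('# ') and not l.startswith('## ')]
--     if not titles:
--         return ''
--     tail = [l.strip() for l in lines[titles[0] + 1:]]
--     skip = [s in ('', '---') or s.startswith('> **') for s in tail]
--     j = skip.index(False) if False in skip else len(tail)
--     quoted = [s.startswith('>') for s in tail]
--     rest_quoted = quoted[j:]
--     k = j + rest_quoted.index(False) if False in rest_quoted else len(tail)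
--     if j == k:
--         return ''
--     return '\n'.join(s[2:] if s.startswith('> ') else s[1:] for s in tail[j:k])
-- ===== Notes on version B (the rewrite author's own statement) =====
-- stated objective: alternative
-- what changed: Replaced A's single flag-driven state machine with an offline classification: B precomputes boolean masks (skip-line, blockquote-line) over the stripped tail after the title, locates the block boundaries j and k with list.index on the masks, then slices tail[j:k] and maps/joins the pieces.
import Mathlib
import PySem

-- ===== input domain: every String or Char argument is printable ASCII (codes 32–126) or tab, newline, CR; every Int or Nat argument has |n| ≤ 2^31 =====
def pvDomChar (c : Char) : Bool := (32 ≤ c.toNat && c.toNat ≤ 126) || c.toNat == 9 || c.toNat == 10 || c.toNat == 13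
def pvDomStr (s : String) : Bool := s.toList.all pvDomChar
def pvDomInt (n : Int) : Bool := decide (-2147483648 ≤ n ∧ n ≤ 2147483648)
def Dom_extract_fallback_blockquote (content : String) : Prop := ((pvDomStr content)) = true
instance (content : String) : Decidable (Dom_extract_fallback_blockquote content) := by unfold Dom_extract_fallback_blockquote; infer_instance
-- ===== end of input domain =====

-- B replaces A's flag-driven state machine by precomputed boolean masks with .index/slice boundary arithmetic; return value only.

-- ===== PORT A =====
-- content.split('\n'); the separator is nonempty, so split? is always some
def pvLines (content : String) : List String := (PySem.Str.split? content "\n").getD []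

-- A's single for-loop with its two flags and accumulator, transcribed
def pvALoop (lines : List String) (titleFound collecting : Bool) (acc : List String) : List String :=
  match lines with
  | [] => acc
  | line :: rest =>
    if titleFound = false then
      if PySem.Str.startswith line "# " && !(PySem.Str.startswith line "## ") then
        pvALoop rest true collecting acc
      else
        pvALoop rest false collecting acc
    else
      let stripped := PySem.Str.strip line
      if collecting = false then
        if stripped == "" || stripped == "---" then pvALoop rest titleFound false acc
        else if PySem.Str.startswith stripped "> **" then pvALoop rest titleFound false acc
        else if PySem.Str.startswith stripped "> " then
          pvALoop rest titleFound true (acc ++ [PySem.Str.slice stripped (some 2) none])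
        else if PySem.Str.startswith stripped ">" then
          pvALoop rest titleFound true (acc ++ [PySem.Str.slice stripped (some 1) none])
        else acc
      else
        if PySem.Str.startswith stripped "> " then
          pvALoop rest titleFound collecting (acc ++ [PySem.Str.slice stripped (some 2) none])
        else if PySem.Str.startswith stripped ">" then
          pvALoop rest titleFound collecting (acc ++ [PySem.Str.slice stripped (some 1) none])
        else acc

def extract_fallback_blockquote (content : String) : String :=
  PySem.Str.join "\n" (pvALoop (pvLines content) false false [])

-- ===== PORT B =====
-- s in ('', '---') or s.startswith('> **')
def pvSkipPred (s : String) : Bool := s == "" || s == "---" || PySem.Str.startswith s "> **"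
-- s.startswith('>')
def pvQuotePred (s : String) : Bool := PySem.Str.startswith s ">"
-- s[2:] if s.startswith('> ') else s[1:]
def pvPiece (s : String) : String :=
  if PySem.Str.startswith s "> " then PySem.Str.slice s (some 2) none
  else PySem.Str.slice s (some 1) none

def extract_fallback_blockquote_alt (content : String) : String :=
  let lines := pvLines content
  -- titles = [i for i, l in enumerate(lines) if l.startswith('# ') and not l.startswith('## ')]
  let titles := (PySem.List.enumerate lines 0).filterMap
    (fun p => if PySem.Str.startswith p.2 "# " && !(PySem.Str.startswith p.2 "## ") then some p.1 else none)
  match titles.head? with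
  | none => ""
  | some t =>
    -- tail = [l.strip() for l in lines[titles[0] + 1:]]
    let tail := (PySem.List.slice lines (some (t + 1)) none).map PySem.Str.strip
    let skip := tail.map pvSkipPred
    let j : Nat := if false ∈ skip then (PySem.List.index? skip false).getD 0 else tail.length
    let quoted := tail.map pvQuotePred
    let restQuoted := PySem.List.slice quoted (some (j : Int)) none
    let k : Nat := if false ∈ restQuoted then j + (PySem.List.index? restQuoted false).getD 0
                   else tail.length
    if j == k then ""
    else PySem.Str.join "\n" ((PySem.List.slice tail (some (j : Int)) (some (k : Int))).map pvPiece)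

-- ===== PRECONDITION & SPEC =====
def Spec_extract_fallback_blockquote (content : String) (out : String) : Prop := out = extract_fallback_blockquote_alt content
instance (content : String) (out : String) : Decidable (Spec_extract_fallback_blockquote content out) := by unfold Spec_extract_fallback_blockquote; infer_instance

-- ===== CLAIM (what is proved, stated in full; the proofs are below) =====
def Claim_equal_extract_fallback_blockquote : Prop := ∀ (content : String), Dom_extract_fallback_blockquote content → Spec_extract_fallback_blockquote content (extract_fallback_blockquote content)

-- ===== LEMMAS AND PROOFS =====

-- proof-side recursive characterisations of the three phases of A's loop
def pvFindTitle (lines : List String) : Option (List String) :=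
  match lines with
  | [] => none
  | line :: rest =>
    if PySem.Str.startswith line "# " && !(PySem.Str.startswith line "## ") then some rest
    else pvFindTitle rest

-- skip phase over the already-stripped tail
def sSkip (tail : List String) : Option (String × List String) :=
  match tail with
  | [] => none
  | s :: r => if pvSkipPred s then sSkip r else some (s, r)

-- collect phase over the already-stripped tail
def sCollect (tail : List String) : List String :=
  match tail with
  | [] => []
  | s :: r => if pvQuotePred s then pvPiece s :: sCollect r else []

-- collecting phase: A's loop with both flags set appends exactly the collected pieces
theorem pvALoop_collect (lines : List String) (acc : List String) :
    pvALoop lines true true acc = acc ++ sCollect (lines.map PySem.Str.strip) := by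
  induction lines generalizing acc with
  | nil => simp [pvALoop, sCollect]
  | cons line rest ih =>
    by_cases h2 : PySem.Chars.startswith (PySem.Chars.strip line.toList) ['>', ' '] = true
    · have h1 : PySem.Chars.startswith (PySem.Chars.strip line.toList) ['>'] = true := by
        rw [PySem.Chars.startswith_iff] at *
        exact List.IsPrefix.trans (l₂ := ['>', ' ']) ⟨[' '], rfl⟩ h2
      simp [pvALoop, sCollect, pvPiece, pvQuotePred, h1, h2, ih]
    · by_cases h1 : PySem.Chars.startswith (PySem.Chars.strip line.toList) ['>'] = true
      · simp [pvALoop, sCollect, pvPiece, pvQuotePred, h1, h2, ih]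
      · simp [pvALoop, sCollect, pvQuotePred, h1, h2]

-- skip phase: A's loop after the title, before collecting
theorem pvALoop_skip (lines : List String) :
    pvALoop lines true false [] =
      (match sSkip (lines.map PySem.Str.strip) with
       | none => []
       | some (stop, rest') =>
         if !(pvQuotePred stop) then [] else pvPiece stop :: sCollect rest') := by
  induction lines with
  | nil => simp [pvALoop, sSkip]
  | cons line rest ih =>
    by_cases he : PySem.Str.strip line = ""
    · simp [pvALoop, sSkip, pvSkipPred, he, ih]
    · by_cases hd : PySem.Str.strip line = "---"
      · simp [pvALoop, sSkip, pvSkipPred, hd, ih]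
      · by_cases hm : PySem.Chars.startswith (PySem.Chars.strip line.toList) ['>', ' ', '*', '*'] = true
        · simp [pvALoop, sSkip, pvSkipPred, he, hd, hm, ih]
        · by_cases h2 : PySem.Chars.startswith (PySem.Chars.strip line.toList) ['>', ' '] = true
          · have h1 : PySem.Chars.startswith (PySem.Chars.strip line.toList) ['>'] = true := by
              rw [PySem.Chars.startswith_iff] at *
              exact List.IsPrefix.trans (l₂ := ['>', ' ']) ⟨[' '], rfl⟩ h2
            simp [pvALoop, sSkip, pvSkipPred, pvQuotePred, pvPiece, he, hd, hm, h1, h2, pvALoop_collect]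
          · by_cases h1 : PySem.Chars.startswith (PySem.Chars.strip line.toList) ['>'] = true
            · simp [pvALoop, sSkip, pvSkipPred, pvQuotePred, pvPiece, he, hd, hm, h1, h2, pvALoop_collect]
            · simp [pvALoop, sSkip, pvSkipPred, pvQuotePred, he, hd, hm, h1, h2]

-- title phase: A's loop before the title
theorem pvALoop_title (lines : List String) :
    pvALoop lines false false [] =
      (match pvFindTitle lines with
       | none => []
       | some rest => pvALoop rest true false []) := by
  induction lines with
  | nil => simp [pvALoop, pvFindTitle]
  | cons line rest ih =>
    by_cases ha : PySem.Chars.startswith line.toList ['#', ' '] = true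
    · by_cases hb : PySem.Chars.startswith line.toList ['#', '#', ' '] = true
      · simp [pvALoop, pvFindTitle, ha, hb, ih]
      · simp [pvALoop, pvFindTitle, ha, hb]
    · simp [pvALoop, pvFindTitle, ha, ih]

-- B's title comprehension: its head, if any, is the index whose successor-drop pvFindTitle returns
theorem titles_head (lines : List String) (s : Nat) :
    (match ((PySem.List.enumerate lines (s : Int)).filterMap
        (fun p => if PySem.Str.startswith p.2 "# " && !(PySem.Str.startswith p.2 "## ") then some p.1 else none)).head? with
     | none => pvFindTitle lines = none
     | some t => ∃ kk : Nat, t = ((s : Int) + kk) ∧ pvFindTitle lines = some (lines.drop (kk + 1))) := by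
  induction lines generalizing s with
  | nil => simp [PySem.List.enumerate_nil, pvFindTitle]
  | cons line rest ih =>
    have hcast : ((s : Int) + 1) = (((s + 1 : Nat)) : Int) := by push_cast; ring
    by_cases h : (PySem.Str.startswith line "# " && !(PySem.Str.startswith line "## ")) = true
    · simp only [PySem.List.enumerate_cons, List.filterMap_cons, h, if_true,
        List.head?_cons]
      refine ⟨0, by simp, ?_⟩
      simp only [pvFindTitle, h, if_true]
      simp
    · have h' : (PySem.Str.startswith line "# " && !(PySem.Str.startswith line "## ")) = false := by
        simpa using h
      have hstep : pvFindTitle (line :: rest) = pvFindTitle rest := by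
        simp only [pvFindTitle, h', Bool.false_eq_true, if_false]
      have hih := ih (s + 1)
      simp only [PySem.List.enumerate_cons, List.filterMap_cons, h', Bool.false_eq_true, if_false,
        hcast, hstep]
      cases hh : (((PySem.List.enumerate rest (((s + 1 : Nat)) : Int)).filterMap
          (fun p => if PySem.Str.startswith p.2 "# " && !(PySem.Str.startswith p.2 "## ") then some p.1 else none)).head?) with
      | none =>
        rw [hh] at hih
        exact hih
      | some t =>
        rw [hh] at hih
        obtain ⟨kk, ht, hrest⟩ := hih
        exact ⟨kk + 1, by push_cast at ht ⊢; omega, by rw [hrest]; simp⟩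

-- B's j computation locates exactly what sSkip returns
theorem index_skip (tail : List String) :
    (match sSkip tail with
     | none => false ∉ tail.map pvSkipPred
     | some (stop, rest') => ∃ n : Nat, PySem.List.index? (tail.map pvSkipPred) false = some n ∧
         tail.drop n = stop :: rest' ∧ n < tail.length) := by
  induction tail with
  | nil => simp [sSkip]
  | cons sx r ih =>
    by_cases h : pvSkipPred sx = true
    · simp only [sSkip, h]
      cases hs : sSkip r with
      | none =>
        rw [hs] at ih; simp [h, ih]
      | some p =>
        rw [hs] at ih
        obtain ⟨stop, rest'⟩ := p
        obtain ⟨n, hidx, hdrop, hlt⟩ := ih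
        refine ⟨n + 1, ?_, by simpa using hdrop, by simp; omega⟩
        rw [List.map_cons, h, PySem.List.index?_cons_of_ne (x := true) (v := false) _ (by decide), hidx]
        rfl
    · have h' : pvSkipPred sx = false := by simpa using h
      simp only [sSkip, h', Bool.false_eq_true, if_false]
      refine ⟨0, ?_, rfl, by simp⟩
      rw [List.map_cons, h']
      exact PySem.List.index?_cons_self _ _

-- B's k computation delimits exactly what sCollect collects
theorem index_collect (rest : List String) :
    (match PySem.List.index? (rest.map pvQuotePred) false with
     | none => sCollect rest = rest.map pvPiece
     | some m => sCollect rest = (rest.take m).map pvPiece ∧ m ≤ rest.length) := by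
  induction rest with
  | nil => simp [sCollect]
  | cons sx r ih =>
    by_cases h : pvQuotePred sx = true
    · rw [List.map_cons, h, PySem.List.index?_cons_of_ne (x := true) (v := false) _ (by decide)]
      cases hi : PySem.List.index? (r.map pvQuotePred) false with
      | none => rw [hi] at ih; simp [sCollect, h, ih]
      | some m =>
        rw [hi] at ih
        simp only [Option.map_some]
        exact ⟨by simp [sCollect, h, ih.1], by simp; omega⟩
    · have h' : pvQuotePred sx = false := by simpa using h
      rw [List.map_cons, h', PySem.List.index?_cons_self]
      exact ⟨by simp [sCollect, h'], by simp⟩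

-- ===== VERDICT (by name: the statement is the Claim_ definition above) =====
theorem extract_fallback_blockquote_spec : Claim_equal_extract_fallback_blockquote := by
  intro content _
  unfold Spec_extract_fallback_blockquote extract_fallback_blockquote
  simp only [extract_fallback_blockquote_alt]
  rw [pvALoop_title]
  have hT := titles_head (pvLines content) 0
  simp only [Nat.cast_zero] at hT
  cases hhead : (((PySem.List.enumerate (pvLines content) (0 : Int)).filterMap
      (fun p => if PySem.Str.startswith p.2 "# " && !(PySem.Str.startswith p.2 "## ") then some p.1 else none)).head?) with
  | none =>
    rw [hhead] at hT
    rw [hT]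
    simp [PySem.Str.join, PySem.Chars.join, List.intercalate]
  | some t =>
    rw [hhead] at hT
    obtain ⟨kk, ht, hrest⟩ := hT
    rw [hrest]
    dsimp only
    rw [pvALoop_skip]
    have hslice : PySem.List.slice (pvLines content) (some (t + 1)) none
        = (pvLines content).drop (kk + 1) := by
      rw [ht]
      have : (0 : Int) + (kk : Int) + 1 = ((kk + 1 : Nat) : Int) := by push_cast; omega
      rw [this, PySem.List.slice_from_natCast]
    rw [hslice]
    set tail := ((pvLines content).drop (kk + 1)).map PySem.Str.strip with htail
    have hJ := index_skip tail
    cases hs : sSkip tail with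
    | none =>
      rw [hs] at hJ
      have hnotin : false ∉ tail.map pvSkipPred := hJ
      rw [if_neg hnotin]
      have hq : PySem.List.slice (tail.map pvQuotePred) (some ((tail.length : Nat) : Int)) none = ([] : List Bool) := by
        rw [PySem.List.slice_from_natCast]; simp
      rw [hq]
      simp [PySem.Str.join, PySem.Chars.join, List.intercalate]
    | some p =>
      obtain ⟨stop, rest'⟩ := p
      rw [hs] at hJ
      obtain ⟨n, hidx, hdrop, hlt⟩ := hJ
      dsimp only
      have hmem : false ∈ List.map pvSkipPred tail := by
        by_contra hc
        rw [(PySem.List.index?_eq_none_iff _ _).mpr hc] at hidx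
        cases hidx
      rw [if_pos hmem]
      rw [hidx]
      simp only [Option.getD_some]
      have hqdrop : PySem.List.slice (tail.map pvQuotePred) (some ((n : Nat) : Int)) none
          = pvQuotePred stop :: rest'.map pvQuotePred := by
        rw [PySem.List.slice_from_natCast, ← List.map_drop, hdrop, List.map_cons]
      rw [hqdrop]
      by_cases hq : pvQuotePred stop = true
      · rw [hq]
        have hK := index_collect rest'
        cases hk : PySem.List.index? (rest'.map pvQuotePred) false with
        | none =>
          rw [hk] at hK
          have hnm : false ∉ (true : Bool) :: rest'.map pvQuotePred := by
            simpa using (PySem.List.index?_eq_none_iff _ _).mp hk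
          rw [if_neg hnm]
          have hne : (n == tail.length) = false := by simp; omega
          rw [hne]
          simp only [Bool.false_eq_true, if_false]
          have hsl : PySem.List.slice tail (some ((n : Nat) : Int)) (some ((tail.length : Nat) : Int))
              = stop :: rest' := by
            have h2 := congrArg List.length hdrop
            rw [List.length_drop] at h2
            rw [PySem.List.slice_natCast, hdrop,
              List.take_of_length_le (by simp only [List.length_cons] at h2 ⊢; omega)]
          rw [hsl]
          simp [hK]
        | some m =>
          rw [hk] at hK
          obtain ⟨hcol, hm⟩ := hK
          have hmem2 : false ∈ (true : Bool) :: rest'.map pvQuotePred :=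
            (PySem.List.index?_isSome_iff _ _).mp (by
              rw [PySem.List.index?_cons_of_ne (x := true) (v := false) _ (by decide), hk]; simp)
          rw [if_pos hmem2]
          rw [PySem.List.index?_cons_of_ne (x := true) (v := false) _ (by decide), hk]
          simp only [Option.map_some, Option.getD_some]
          have hne : (n == n + (m + 1)) = false := by simp
          rw [hne]
          simp only [Bool.false_eq_true, if_false]
          have hsl : PySem.List.slice tail (some ((n : Nat) : Int)) (some ((n + (m + 1) : Nat) : Int))
              = stop :: rest'.take m := by
            have : ((n + (m + 1) : Nat) : Int) = ((n : Nat) : Int) + ((m + 1 : Nat) : Int) := by push_cast; ring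
            rw [this, PySem.List.slice_natCast_add, hdrop, List.take_succ_cons]
          rw [hsl]
          simp [hcol]
      · have hq' : pvQuotePred stop = false := by simpa using hq
        rw [hq']
        have hmem3 : false ∈ (false : Bool) :: rest'.map pvQuotePred := List.mem_cons_self
        rw [if_pos hmem3]
        rw [PySem.List.index?_cons_self]
        simp only [Option.getD_some, Nat.add_zero]
        simp [PySem.Str.join, PySem.Chars.join, List.intercalate]
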